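-- pv_equiv track=rewrite | github.com/miner-zhong/Count-Propagation-for-Link-Flow-Estimation | util.py | get_feasible_paths_2_f
-- ===== SOURCE A (Python) =====
-- def get_feasible_paths_2_f(all_paths, obs_states):  # stop: obs_state(forward)
--     all_paths_feasible = []
--
--     temp_list = []
--     for p in all_paths:
--         p_new = []
--         flag = True
--         for s in p:
--             if (flag == False):
--                 break
--             else:
--                 if not (s in obs_states):
--                     p_new.append(s)
--                 else:
--                     p_new.append(s)
--                     flag = False
--         if (len(p_new) > 1):
--             temp_list.append(p_new)
--
--     for p in temp_list:
--         if not (p in all_paths_feasible):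
--             all_paths_feasible.append(p)
--
--     return all_paths_feasible
-- ===== SOURCE B (Python) =====
-- def get_feasible_paths_2_f(all_paths, obs_states):
--     result = []
--     for p in all_paths:
--         cut = next((i + 1 for i, s in enumerate(p) if s in obs_states), len(p))
--         p_new = p[:cut]
--         if len(p_new) > 1 and p_new not in result:
--             result.append(p_new)
--     return result
-- ===== Notes on version B (the rewrite author's own statement) =====
-- stated objective: simpler
-- what changed: Single pass over all_paths: the cut point is located by index search and the path sliced once, replacing A's accumulate-with-flag inner loop and its separate filter-then-dedup second pass; filtering and dedup happen inline as each path is produced.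
import Mathlib
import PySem

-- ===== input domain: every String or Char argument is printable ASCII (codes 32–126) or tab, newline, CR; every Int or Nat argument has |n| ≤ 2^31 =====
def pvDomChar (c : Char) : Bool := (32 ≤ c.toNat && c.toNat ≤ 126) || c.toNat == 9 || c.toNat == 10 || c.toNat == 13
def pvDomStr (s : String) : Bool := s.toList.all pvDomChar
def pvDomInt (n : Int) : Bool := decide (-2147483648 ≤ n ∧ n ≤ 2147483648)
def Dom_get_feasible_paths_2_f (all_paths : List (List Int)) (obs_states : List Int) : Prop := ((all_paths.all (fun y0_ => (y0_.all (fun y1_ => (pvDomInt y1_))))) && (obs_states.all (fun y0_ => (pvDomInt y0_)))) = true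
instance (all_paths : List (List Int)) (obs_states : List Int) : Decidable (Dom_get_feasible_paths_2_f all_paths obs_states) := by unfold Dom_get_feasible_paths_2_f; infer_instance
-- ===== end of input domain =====

-- B replaces A's flag-driven inner loop plus separate filter-and-dedup passes by one pass
-- that locates the cut index, slices, and filters/dedups inline (objective: simpler).


-- ===== PORT A =====
-- inner 'for s in p' loop with its flag; 'break' returns the state unchanged
def pvInnerA (obs : List Int) : List Int → List Int × Bool → List Int × Bool
  | [], st => st
  | s :: rest, (p_new, flag) =>
    if flag = false then (p_new, flag)
    else if ¬ (s ∈ obs) then pvInnerA obs rest (p_new ++ [s], flag)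
    else pvInnerA obs rest (p_new ++ [s], false)

def get_feasible_paths_2_f (all_paths : List (List Int)) (obs_states : List Int) : List (List Int) :=
  let temp_list := all_paths.foldl (fun tl p =>
    let pr := pvInnerA obs_states p ([], true)
    if pr.1.length > 1 then tl ++ [pr.1] else tl) []
  temp_list.foldl (fun acc p => if ¬ (p ∈ acc) then acc ++ [p] else acc) []

-- ===== PORT B =====
-- index of first observed state plus one, or len(p) if none (the 'next(…, len(p))')
def pvCutB (obs : List Int) (p : List Int) : Nat :=
  match p.findIdx? (fun s => decide (s ∈ obs)) with
  | some i => i + 1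
  | none => p.length

def get_feasible_paths_2_f_alt (all_paths : List (List Int)) (obs_states : List Int) : List (List Int) :=
  all_paths.foldl (fun res p =>
    let p_new := p.take (pvCutB obs_states p)
    if p_new.length > 1 ∧ ¬ (p_new ∈ res) then res ++ [p_new] else res) []

-- ===== PRECONDITION & SPEC =====
def Spec_get_feasible_paths_2_f (all_paths : List (List Int)) (obs_states : List Int) (out : List (List Int)) : Prop := out = get_feasible_paths_2_f_alt all_paths obs_states
instance (all_paths : List (List Int)) (obs_states : List Int) (out : List (List Int)) : Decidable (Spec_get_feasible_paths_2_f all_paths obs_states out) := by unfold Spec_get_feasible_paths_2_f; infer_instance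

-- ===== CLAIM (what is proved, stated in full; the proofs are below) =====
def Claim_equal_get_feasible_paths_2_f : Prop := ∀ (all_paths : List (List Int)) (obs_states : List Int), Dom_get_feasible_paths_2_f all_paths obs_states → Spec_get_feasible_paths_2_f all_paths obs_states (get_feasible_paths_2_f all_paths obs_states)

-- ===== LEMMAS AND PROOFS =====

-- A's inner loop computes the inclusive prefix up to the first observed state
theorem pvInnerA_eq_take (obs : List Int) : ∀ (p acc : List Int),
    (pvInnerA obs p (acc, true)).1 = acc ++ p.take (pvCutB obs p) := by
  intro p
  induction p with
  | nil => intro acc; simp [pvInnerA, pvCutB]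
  | cons s rest ih =>
    intro acc
    by_cases hs : s ∈ obs
    · have hstop : ∀ q acc', (pvInnerA obs q (acc', false)).1 = acc' := by
        intro q acc'; cases q <;> simp [pvInnerA]
      simp [pvInnerA, hs, pvCutB, List.findIdx?_cons, hstop]
    · simp [pvInnerA, hs, ih, pvCutB, List.findIdx?_cons]
      cases h : List.findIdx? (fun s => decide (s ∈ obs)) rest <;> simp

-- fusing A's two passes into B's single pass, generalized over the accumulator
theorem pv_fuse (obs : List Int) : ∀ (xs : List (List Int)) (tl acc : List (List Int)),
    (xs.foldl (fun tl p =>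
        let pr := pvInnerA obs p ([], true)
        if pr.1.length > 1 then tl ++ [pr.1] else tl) tl).foldl
      (fun acc p => if ¬ (p ∈ acc) then acc ++ [p] else acc) acc
    = xs.foldl (fun res p =>
        let p_new := p.take (pvCutB obs p)
        if p_new.length > 1 ∧ ¬ (p_new ∈ res) then res ++ [p_new] else res)
      (tl.foldl (fun acc p => if ¬ (p ∈ acc) then acc ++ [p] else acc) acc) := by
  intro xs
  induction xs with
  | nil => intro tl acc; simp
  | cons x xs ih =>
    intro tl acc
    have ht : (pvInnerA obs x ([], true)).1 = x.take (pvCutB obs x) := by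
      simpa using pvInnerA_eq_take obs x []
    by_cases h1 : (x.take (pvCutB obs x)).length > 1
    · simp only [List.foldl_cons, ht, h1, if_pos]
      rw [ih]
      congr 1
      by_cases h2 : x.take (pvCutB obs x) ∈ tl.foldl (fun acc p => if ¬ (p ∈ acc) then acc ++ [p] else acc) acc
      · simp [List.foldl_append]
      · simp [List.foldl_append]
    · simp only [List.foldl_cons, ht, h1, if_neg, not_false_eq_true]
      rw [ih]
      simp

-- ===== VERDICT (by name: the statement is the Claim_ definition above) =====
theorem get_feasible_paths_2_f_spec : Claim_equal_get_feasible_paths_2_f := by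
  intro all_paths obs_states _
  unfold Spec_get_feasible_paths_2_f get_feasible_paths_2_f get_feasible_paths_2_f_alt
  simpa using pv_fuse obs_states all_paths [] []
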